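-- pv_equiv track=rewrite | github.com/seungjunGong/seungjunGong-baekjoonStudy | 프로그래머스/2/131127. 할인 행사/할인 행사.py | solution
-- ===== SOURCE A (Python) =====
-- def solution(want, number, discount):
--     answer = 0
--
--     products = discount[:10].copy()
--     calc = {want[i] : number[i] for i in range(len(want))}
--
--     for product in products:
--         if product in want:
--             calc[product] -= 1
--
--     checking = lambda c : len(list(filter(lambda x: x <= 0, c.values()))) == len(want)
--
--     if checking(calc):
--         answer += 1
--
--     for i in range(10, len(discount)):
--         out_p, in_p = products.pop(0), discount[i]
--         products.append(discount[i])
--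
--         if out_p in want:
--             calc[out_p] += 1
--
--         if in_p in want:
--             calc[in_p] -= 1
--
--         if checking(calc):
--             answer += 1
--
--     return answer
-- ===== SOURCE B (Python) =====
-- def solution(want, number, discount):
--     # Incremental sliding window: maintain how many wanted products are
--     # currently satisfied instead of rescanning the whole dict per window.
--     calc = {}
--     for w, n in zip(want, number):
--         calc[w] = n
--     target = len(want)
--
--     for p in discount[:10]:
--         if p in calc:
--             calc[p] -= 1
--
--     sat = sum(1 for v in calc.values() if v <= 0)
--     answer = 1 if sat == target else 0
--
--     for i in range(10, len(discount)):
--         out_p = discount[i - 10]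
--         in_p = discount[i]
--         if out_p in calc:
--             calc[out_p] += 1
--             if calc[out_p] == 1:
--                 sat -= 1
--         if in_p in calc:
--             calc[in_p] -= 1
--             if calc[in_p] == 0:
--                 sat += 1
--         if sat == target:
--             answer += 1
--     return answer
-- ===== Notes on version B (the rewrite author's own statement) =====
-- stated objective: faster
-- what changed: B builds the product->count dict by zipping instead of index lookups and, instead of rescanning all dict values for every window (A's checking), maintains the number of satisfied products incrementally as each window slides, indexing the outgoing element directly rather than popping from a rotating list.
import Mathlib
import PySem

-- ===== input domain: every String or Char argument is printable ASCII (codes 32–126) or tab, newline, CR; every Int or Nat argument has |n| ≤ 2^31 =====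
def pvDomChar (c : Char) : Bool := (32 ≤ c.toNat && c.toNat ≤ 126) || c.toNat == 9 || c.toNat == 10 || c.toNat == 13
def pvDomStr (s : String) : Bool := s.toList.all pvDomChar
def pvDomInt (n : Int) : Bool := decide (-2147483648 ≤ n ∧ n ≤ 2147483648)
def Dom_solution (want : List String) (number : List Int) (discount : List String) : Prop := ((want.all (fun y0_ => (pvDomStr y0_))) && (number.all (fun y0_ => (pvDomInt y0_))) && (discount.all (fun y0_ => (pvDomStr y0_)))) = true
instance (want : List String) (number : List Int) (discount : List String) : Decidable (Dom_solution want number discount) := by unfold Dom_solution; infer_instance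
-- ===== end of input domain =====

-- B replaces A's per-window rescan of the whole dict by an incrementally maintained
-- count of satisfied products (objective: faster).

-- ===== PORT A =====
-- checking(calc): len(list(filter(lambda x: x <= 0, c.values()))) == len(want)
def checkingA (c : PySem.Dict String Int) (nwant : Nat) : Bool :=
  (c.values.filter (fun x => decide (x ≤ 0))).length == nwant

-- the body of A's main for-loop (state: products, calc, answer)
def stepA (want discount : List String)
    (st : List String × PySem.Dict String Int × Int) (i : Int) :
    List String × PySem.Dict String Int × Int :=
  let products := st.1
  let cal := st.2.1
  let answer := st.2.2
  -- products.pop(0): products has exactly 10 elements whenever this loop runs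
  let popped := (PySem.List.pop? products 0).getD ("", [])
  let out_p := popped.1
  let in_p := PySem.List.pyGetD discount i ""
  let products := popped.2 ++ [in_p]
  let cal := if want.contains out_p then cal.modify out_p 0 (· + 1) else cal
  let cal := if want.contains in_p then cal.modify in_p 0 (· - 1) else cal
  let answer := if checkingA cal want.length then answer + 1 else answer
  (products, cal, answer)

def solution (want : List String) (number : List Int) (discount : List String) : Int :=
  let answer : Int := 0
  let products := PySem.List.slice discount none (some 10)
  -- {want[i]: number[i] for i in range(len(want))}; the indexings are in range
  -- for want always, for number under Pre_ (else Python raises IndexError)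
  let cal := (PySem.List.pyRange 0 (want.length) 1).foldl
    (fun d i => d.insert (PySem.List.pyGetD want i "") (PySem.List.pyGetD number i 0))
    PySem.Dict.empty
  -- first window: calc[product] -= 1 only fires when product ∈ want, so the key exists
  let cal := products.foldl
    (fun c p => if want.contains p then c.modify p 0 (· - 1) else c) cal
  let answer := if checkingA cal want.length then answer + 1 else answer
  let st := (PySem.List.pyRange 10 (discount.length) 1).foldl
    (stepA want discount) (products, cal, answer)
  st.2.2

-- ===== PORT B =====
-- the body of B's main for-loop (state: calc, sat, answer)
def stepB (discount : List String) (target : Int)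
    (st : PySem.Dict String Int × Int × Int) (i : Int) :
    PySem.Dict String Int × Int × Int :=
  let cal := st.1
  let sat := st.2.1
  let answer := st.2.2
  let out_p := PySem.List.pyGetD discount (i - 10) ""
  let in_p := PySem.List.pyGetD discount i ""
  let cs := if cal.contains out_p then
      let c := cal.modify out_p 0 (· + 1)
      (c, if c.getD out_p 0 == 1 then sat - 1 else sat)
    else (cal, sat)
  let cs2 := if cs.1.contains in_p then
      let c := cs.1.modify in_p 0 (· - 1)
      (c, if c.getD in_p 0 == 0 then cs.2 + 1 else cs.2)
    else cs
  (cs2.1, cs2.2, if cs2.2 == target then answer + 1 else answer)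

def solution_alt (want : List String) (number : List Int) (discount : List String) : Int :=
  let cal := (want.zip number).foldl (fun d wn => d.insert wn.1 wn.2) PySem.Dict.empty
  let target : Int := want.length
  let cal := (PySem.List.slice discount none (some 10)).foldl
    (fun c p => if c.contains p then c.modify p 0 (· - 1) else c) cal
  let sat : Int := cal.values.foldl (fun s v => if v ≤ 0 then s + 1 else s) 0
  let answer : Int := if sat == target then 1 else 0
  let st := (PySem.List.pyRange 10 (discount.length) 1).foldl
    (stepB discount target) (cal, sat, answer)
  st.2.2

-- ===== PRECONDITION & SPEC =====
-- Pre_ excludes inputs with len(number) < len(want), on which A raises IndexError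
-- in the dict comprehension.
def Pre_solution (want : List String) (number : List Int) (discount : List String) : Prop :=
  want.length ≤ number.length
instance (want : List String) (number : List Int) (discount : List String) : Decidable (Pre_solution want number discount) := by unfold Pre_solution; infer_instance

def pvWitness_solution : List String × List Int × List String :=
  (["a", "b"], [1, 2], ["a", "b", "a", "c", "a", "b", "b", "a", "c", "b", "a"])

def Spec_solution (want : List String) (number : List Int) (discount : List String) (out : Int) : Prop := out = solution_alt want number discount
instance (want : List String) (number : List Int) (discount : List String) (out : Int) : Decidable (Spec_solution want number discount out) := by unfold Spec_solution; infer_instance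

-- ===== CLAIM (what is proved, stated in full; the proofs are below) =====
def Claim_equal_solution : Prop := ∀ (want : List String) (number : List Int) (discount : List String), Dom_solution want number discount → Pre_solution want number discount → Spec_solution want number discount (solution want number discount)

-- ===== LEMMAS AND PROOFS =====

-- number of entries of the dict whose value is ≤ 0 (the quantity A recomputes
-- per window and B maintains incrementally)
def Zval (c : PySem.Dict String Int) : Nat := c.values.countP (fun v => decide (v ≤ 0))

-- the two dict-building loops (A: by index, B: by zip) build the same dict
theorem init_dict_eq (ws : List String) (ns : List Int) (d : PySem.Dict String Int)
    (h : ws.length ≤ ns.length) :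
    (PySem.List.pyRange 0 (ws.length) 1).foldl
      (fun d i => d.insert (PySem.List.pyGetD ws i "") (PySem.List.pyGetD ns i 0)) d
    = (ws.zip ns).foldl (fun d wn => d.insert wn.1 wn.2) d := by
  rw [PySem.List.pyRange_zero_nat, List.foldl_map]
  simp only [PySem.List.pyGetD_natCast]
  induction ws generalizing ns d with
  | nil => simp
  | cons w ws ih =>
    match ns, h with
    | n :: ns, h =>
      rw [show (w :: ws).length = ws.length + 1 from rfl, List.range_succ_eq_map, List.foldl_cons, List.foldl_map]
      simp only [List.getD_cons_zero, List.getD_cons_succ, Nat.succ_eq_add_one]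
      rw [List.zip_cons_cons, List.foldl_cons]
      exact ih ns _ (by simpa using h)

-- counting a predicate over a map that changed at exactly one (Nodup) position
theorem countP_map_pointwise {κ : Type} [DecidableEq κ] (q : Int → Bool) (ks : List κ)
    (g g' : κ → Int) (p : κ) (hnd : ks.Nodup) (hp : p ∈ ks)
    (hoff : ∀ k, k ≠ p → g' k = g k) :
    ((ks.map g').countP q : Int)
      = (ks.map g).countP q + ((if q (g' p) then 1 else 0) - (if q (g p) then 1 else 0)) := by
  induction ks with
  | nil => simp at hp
  | cons k ks ih =>
    rcases List.nodup_cons.mp hnd with ⟨hk, hnd'⟩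
    rcases List.mem_cons.mp hp with hpk | hp'
    · subst hpk
      simp only [List.map_cons, List.countP_cons]
      rw [show ks.map g' = ks.map g from
            List.map_congr_left fun x hx => hoff x (by rintro rfl; exact hk hx)]
      push_cast
      split_ifs <;> omega
    · have hkp : k ≠ p := by rintro rfl; exact hk hp'
      simp only [List.map_cons, List.countP_cons, hoff k hkp]
      push_cast
      have := ih hnd' hp'
      split_ifs at this ⊢ <;> omega

theorem keys_modify_of_contains (c : PySem.Dict String Int) (p : String) (d0 : Int)
    (f : Int → Int) (hc : c.contains p = true) : (c.modify p d0 f).keys = c.keys := by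
  rw [PySem.Dict.keys_modify]
  exact PySem.Dict.keys_insert_of_contains c (f (c.getD p d0)) hc

theorem Z_modify (c : PySem.Dict String Int) (p : String) (f : Int → Int)
    (hnd : c.keys.Nodup) (hc : c.contains p = true) :
    ((Zval (c.modify p 0 f)) : Int)
      = (Zval c : Int) + ((if f (c.getD p 0) ≤ 0 then 1 else 0)
          - (if c.getD p 0 ≤ 0 then 1 else 0)) := by
  have hkeys := keys_modify_of_contains c p 0 f hc
  have hnd' : (c.modify p 0 f).keys.Nodup := hkeys ▸ hnd
  have hp : p ∈ c.keys := (PySem.Dict.contains_iff_mem_keys c p).mp hc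
  unfold Zval
  rw [PySem.Dict.values_eq_map_keys _ hnd' 0, PySem.Dict.values_eq_map_keys _ hnd 0, hkeys]
  have := countP_map_pointwise (fun v => decide (v ≤ 0)) c.keys
    (fun k => c.getD k 0) (fun k => (c.modify p 0 f).getD k 0) p hnd hp
    (fun k hk => by simp only []; rw [PySem.Dict.getD_modify]; exact if_neg hk)
  rw [this]
  simp only [PySem.Dict.getD_modify_self, decide_eq_true_eq]

theorem Z_inc (c : PySem.Dict String Int) (p : String)
    (hnd : c.keys.Nodup) (hc : c.contains p = true) :
    ((Zval (c.modify p 0 (· + 1))) : Int)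
      = (Zval c : Int) - (if (c.modify p 0 (· + 1)).getD p 0 == 1 then 1 else 0) := by
  rw [Z_modify c p _ hnd hc]
  simp only [PySem.Dict.getD_modify_self, beq_iff_eq]
  split_ifs <;> omega

theorem Z_dec (c : PySem.Dict String Int) (p : String)
    (hnd : c.keys.Nodup) (hc : c.contains p = true) :
    ((Zval (c.modify p 0 (· - 1))) : Int)
      = (Zval c : Int) + (if (c.modify p 0 (· - 1)).getD p 0 == 0 then 1 else 0) := by
  rw [Z_modify c p _ hnd hc]
  simp only [PySem.Dict.getD_modify_self, beq_iff_eq]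
  split_ifs <;> omega

theorem contains_modify_inv (c : PySem.Dict String Int) (want : List String) (p : String)
    (d0 : Int) (f : Int → Int) (hcont : ∀ q, c.contains q = want.contains q)
    (hp : want.contains p = true) :
    ∀ q, (c.modify p d0 f).contains q = want.contains q := by
  intro q
  rw [PySem.Dict.contains_modify]
  by_cases hq : q = p
  · subst hq; simp [List.contains_iff_mem.mp hp]
  · simp [beq_iff_eq, hq, hcont q]

-- the two first-window folds agree and preserve the invariants
theorem window_fold_eq (want : List String) (l : List String) :
    ∀ (c : PySem.Dict String Int), (∀ p, c.contains p = want.contains p) → c.keys.Nodup →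
    l.foldl (fun c p => if want.contains p then c.modify p 0 (· - 1) else c) c
      = l.foldl (fun c p => if c.contains p then c.modify p 0 (· - 1) else c) c
    ∧ (∀ p, (l.foldl (fun c p => if want.contains p then c.modify p 0 (· - 1) else c) c).contains p = want.contains p)
    ∧ (l.foldl (fun c p => if want.contains p then c.modify p 0 (· - 1) else c) c).keys.Nodup := by
  induction l with
  | nil => exact fun c hcont hnd => ⟨rfl, hcont, hnd⟩
  | cons x l ih =>
    intro c hcont hnd
    simp only [List.foldl_cons, hcont x]
    by_cases hx : want.contains x = true
    · have hcx : c.contains x = true := (hcont x).trans hx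
      rw [hx, if_pos rfl]
      exact ih (c.modify x 0 (· - 1)) (contains_modify_inv c want x 0 _ hcont hx)
        ((keys_modify_of_contains c x 0 _ hcx) ▸ hnd)
    · rw [Bool.not_eq_true] at hx
      rw [hx]
      simp only [Bool.false_eq_true, if_false]
      exact ih c hcont hnd

-- A's checking and B's counter test the same condition
theorem checking_iff (c : PySem.Dict String Int) (want : List String) :
    checkingA c want.length = ((Zval c : Int) == (want.length : Int)) := by
  rw [Bool.eq_iff_iff]
  simp [checkingA, Zval, List.countP_eq_length_filter]


-- invariants survive one guarded modify
theorem inv_if (want : List String) (c : PySem.Dict String Int) (p : String) (f : Int → Int)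
    (hnd : c.keys.Nodup) (hcont : ∀ q, c.contains q = want.contains q) :
    (if want.contains p then c.modify p 0 f else c).keys.Nodup
    ∧ (∀ q, (if want.contains p then c.modify p 0 f else c).contains q = want.contains q) := by
  by_cases hx : want.contains p = true
  · rw [hx, if_pos rfl]
    exact ⟨(keys_modify_of_contains c p 0 f ((hcont p).trans hx)) ▸ hnd,
      contains_modify_inv c want p 0 f hcont hx⟩
  · rw [Bool.not_eq_true] at hx
    rw [hx]
    simp only [Bool.false_eq_true, if_false]
    exact ⟨hnd, hcont⟩

-- B's increment update computes exactly the satisfied-count of A's dict update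
theorem pair_inc (want : List String) (c : PySem.Dict String Int) (sat : Int) (p : String)
    (hnd : c.keys.Nodup) (hcont : ∀ q, c.contains q = want.contains q)
    (hsat : sat = (Zval c : Int)) :
    (if c.contains p then
        (c.modify p 0 (· + 1), if (c.modify p 0 (· + 1)).getD p 0 == 1 then sat - 1 else sat)
      else (c, sat))
    = ((if want.contains p then c.modify p 0 (· + 1) else c),
        (Zval (if want.contains p then c.modify p 0 (· + 1) else c) : Int)) := by
  rw [hcont p]
  by_cases hx : want.contains p = true
  · rw [hx]
    simp only [if_true]
    have hz := Z_inc c p hnd ((hcont p).trans hx)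
    refine Prod.ext rfl ?_
    simp only []
    split_ifs at hz ⊢ <;> omega
  · rw [Bool.not_eq_true] at hx
    rw [hx]
    simp only [Bool.false_eq_true, if_false]
    exact Prod.ext rfl hsat

-- B's decrement update computes exactly the satisfied-count of A's dict update
theorem pair_dec (want : List String) (c : PySem.Dict String Int) (sat : Int) (p : String)
    (hnd : c.keys.Nodup) (hcont : ∀ q, c.contains q = want.contains q)
    (hsat : sat = (Zval c : Int)) :
    (if c.contains p then
        (c.modify p 0 (· - 1), if (c.modify p 0 (· - 1)).getD p 0 == 0 then sat + 1 else sat)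
      else (c, sat))
    = ((if want.contains p then c.modify p 0 (· - 1) else c),
        (Zval (if want.contains p then c.modify p 0 (· - 1) else c) : Int)) := by
  rw [hcont p]
  by_cases hx : want.contains p = true
  · rw [hx]
    simp only [if_true]
    have hz := Z_dec c p hnd ((hcont p).trans hx)
    refine Prod.ext rfl ?_
    simp only []
    split_ifs at hz ⊢ <;> omega
  · rw [Bool.not_eq_true] at hx
    rw [hx]
    simp only [Bool.false_eq_true, if_false]
    exact Prod.ext rfl hsat

-- the main sliding-window loops agree on the answer component
theorem main_loop_eq (want discount : List String) :
    ∀ (k : Nat) (a : Int), a + k = (discount.length : Int) → 10 ≤ a →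
    ∀ (products : List String) (c : PySem.Dict String Int) (ans sat : Int),
    products = (discount.drop (a - 10).toNat).take 10 →
    c.keys.Nodup → (∀ p, c.contains p = want.contains p) →
    sat = (Zval c : Int) →
    ((PySem.List.pyRange a (discount.length) 1).foldl (stepA want discount) (products, c, ans)).2.2
      = ((PySem.List.pyRange a (discount.length) 1).foldl (stepB discount (want.length)) (c, sat, ans)).2.2 := by
  intro k
  induction k with
  | zero =>
    intro a ha h10 products c ans sat hprod hnd hcont hsat
    rw [PySem.List.pyRange_one_eq_nil (by omega)]
    rfl
  | succ k ih =>
    intro a ha h10 products c ans sat hprod hnd hcont hsat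
    have hab : a < (discount.length : Int) := by omega
    obtain ⟨m, rfl⟩ : ∃ m : Nat, a = ((m : Int)) + 10 := ⟨(a - 10).toNat, by omega⟩
    have hmlt : m < discount.length := by omega
    have hlen' : m + 10 < discount.length := by omega
    rw [PySem.List.pyRange_one_cons hab, List.foldl_cons, List.foldl_cons]
    have hmm : ((m : Int) + 10 - 10).toNat = m := by omega
    have hpp : products = discount.getD m "" :: ((discount.drop (m + 1)).take 9) := by
      rw [hprod, hmm, List.drop_eq_getElem_cons hmlt,
        show (10 : Nat) = 9 + 1 from rfl, List.take_succ_cons,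
        List.getD_eq_getElem discount "" hmlt]
    have hgout : PySem.List.pyGetD discount ((m : Int) + 10 - 10) "" = discount.getD m "" := by
      rw [show (m : Int) + 10 - 10 = ((m : Nat) : Int) from by omega, PySem.List.pyGetD_natCast]
    have hgin : PySem.List.pyGetD discount ((m : Int) + 10) "" = discount.getD (m + 10) "" := by
      rw [show (m : Int) + 10 = (((m + 10 : Nat)) : Int) from by push_cast; ring,
        PySem.List.pyGetD_natCast]
    have htake : List.take 10 (List.drop (m + 1) discount)
        = List.take 9 (List.drop (m + 1) discount) ++ [discount.getD (m + 10) ""] := by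
      rw [show (10 : Nat) = 9 + 1 from rfl, List.take_add_one, List.getElem?_drop,
        show m + 1 + 9 = m + 10 from by ring, List.getElem?_eq_getElem hlen',
        List.getD_eq_getElem discount "" hlen']
      rfl
    -- evaluate one step of each loop
    rcases inv_if want c (discount.getD m "") (· + 1) hnd hcont with ⟨hnd1, hcont1⟩
    have hsA : stepA want discount (products, c, ans) ((m : Int) + 10)
        = ((discount.drop (m + 1)).take 10, (if want.contains (PySem.List.pyGetD discount ((m : Int) + 10) "") then (if want.contains (discount.getD m "") then c.modify (discount.getD m "") 0 (· + 1) else c).modify (PySem.List.pyGetD discount ((m : Int) + 10) "") 0 (· - 1) else (if want.contains (discount.getD m "") then c.modify (discount.getD m "") 0 (· + 1) else c)),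
           (if checkingA (if want.contains (PySem.List.pyGetD discount ((m : Int) + 10) "") then (if want.contains (discount.getD m "") then c.modify (discount.getD m "") 0 (· + 1) else c).modify (PySem.List.pyGetD discount ((m : Int) + 10) "") 0 (· - 1) else (if want.contains (discount.getD m "") then c.modify (discount.getD m "") 0 (· + 1) else c)) want.length then ans + 1 else ans)) := by
      simp only [stepA, hpp, PySem.List.pop?_zero_cons, Option.getD_some]
      refine Prod.ext ?_ rfl
      simp only []
      rw [hgin, htake, List.getD_eq_getElem discount "" hlen']
    have hsB : stepB discount (want.length) (c, sat, ans) ((m : Int) + 10)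
        = ((if want.contains (PySem.List.pyGetD discount ((m : Int) + 10) "") then (if want.contains (discount.getD m "") then c.modify (discount.getD m "") 0 (· + 1) else c).modify (PySem.List.pyGetD discount ((m : Int) + 10) "") 0 (· - 1) else (if want.contains (discount.getD m "") then c.modify (discount.getD m "") 0 (· + 1) else c)), (Zval (if want.contains (PySem.List.pyGetD discount ((m : Int) + 10) "") then (if want.contains (discount.getD m "") then c.modify (discount.getD m "") 0 (· + 1) else c).modify (PySem.List.pyGetD discount ((m : Int) + 10) "") 0 (· - 1) else (if want.contains (discount.getD m "") then c.modify (discount.getD m "") 0 (· + 1) else c)) : Int),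
           (if ((Zval (if want.contains (PySem.List.pyGetD discount ((m : Int) + 10) "") then (if want.contains (discount.getD m "") then c.modify (discount.getD m "") 0 (· + 1) else c).modify (PySem.List.pyGetD discount ((m : Int) + 10) "") 0 (· - 1) else (if want.contains (discount.getD m "") then c.modify (discount.getD m "") 0 (· + 1) else c)) : Int) == ((want.length : Nat) : Int)) then ans + 1 else ans)) := by
      simp only [stepB]
      rw [hgout, pair_inc want c sat (discount.getD m "") hnd hcont hsat,
        pair_dec want _ _ (PySem.List.pyGetD discount ((m : Int) + 10) "") hnd1 hcont1 rfl]
    rw [hsA, hsB, checking_iff]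
    exact ih ((m : Int) + 10 + 1) (by omega) (by omega) _ _ _ _
      (by rw [show ((m : Int) + 10 + 1 - 10).toNat = m + 1 from by omega])
      (inv_if want _ (PySem.List.pyGetD discount ((m : Int) + 10) "") (· - 1) hnd1 hcont1).1
      (inv_if want _ (PySem.List.pyGetD discount ((m : Int) + 10) "") (· - 1) hnd1 hcont1).2
      rfl

-- ===== VERDICT (by name: the statement is the Claim_ definition above) =====
theorem solution_spec : Claim_equal_solution := by
  intro want number discount _ hpre
  unfold Spec_solution solution solution_alt
  simp only []
  rw [init_dict_eq want number PySem.Dict.empty hpre]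
  have hnd0 : ((want.zip number).foldl (fun d wn => d.insert wn.1 wn.2)
      (PySem.Dict.empty : PySem.Dict String Int)).keys.Nodup :=
    PySem.Dict.nodup_keys_foldl_insert_key (want.zip number) Prod.fst
      (fun _ wn => wn.2) PySem.Dict.empty (by simp [PySem.Dict.keys_empty])
  have hcont0 : ∀ p, ((want.zip number).foldl (fun d wn => d.insert wn.1 wn.2)
      (PySem.Dict.empty : PySem.Dict String Int)).contains p = want.contains p := by
    intro p
    rw [PySem.Dict.contains_eq_decide_mem_keys,
      PySem.Dict.keys_foldl_insert_key (want.zip number) Prod.fst (fun _ wn => wn.2),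
      List.map_fst_zip hpre]
    simp [PySem.Set.mem_update, PySem.Dict.keys_empty]
  obtain ⟨hW, hcont1, hnd1⟩ := window_fold_eq want (PySem.List.slice discount none (some 10))
    _ hcont0 hnd0
  rw [hW] at hcont1 hnd1 ⊢
  rw [checking_iff]
  rw [PySem.List.foldl_ite_add_one (fun v => v ≤ 0)]
  rw [show ((0 : Int) + ↑(List.countP (fun x => decide (x ≤ 0))
      (((PySem.List.slice discount none (some 10)).foldl
        (fun c p => if c.contains p then c.modify p 0 (· - 1) else c)
        ((want.zip number).foldl (fun d wn => d.insert wn.1 wn.2) PySem.Dict.empty)).values)))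
    = (Zval ((PySem.List.slice discount none (some 10)).foldl
        (fun c p => if c.contains p then c.modify p 0 (· - 1) else c)
        ((want.zip number).foldl (fun d wn => d.insert wn.1 wn.2) PySem.Dict.empty)) : Int)
    from by rw [Zval]; ring]
  rw [zero_add]
  by_cases hlen : 10 ≤ discount.length
  · have hp10 : PySem.List.slice discount none (some 10)
        = (discount.drop ((10 : Int) - 10).toNat).take 10 := by
      simp [pysem]
    rw [hp10] at hcont1 hnd1 ⊢
    exact main_loop_eq want discount (discount.length - 10) 10 (by omega)
      (by norm_num) _ _ _ _ rfl hnd1 hcont1 rfl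
  · rw [PySem.List.pyRange_one_eq_nil (by omega)]
    simp
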